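-- pv_equiv track=rewrite | github.com/TowaUeya/FossilViT | src/search.py | resolve_query_id
-- ===== SOURCE A (Python) =====
-- def resolve_query_id(ids: list[str], query: str) -> tuple[int, str]:
--     """Resolve query string to a unique specimen id in `ids`."""
--     if query in ids:
--         return ids.index(query), query
--
--     basename_matches = [sid for sid in ids if sid.rsplit("/", 1)[-1] == query]
--     if len(basename_matches) == 1:
--         resolved = basename_matches[0]
--         return ids.index(resolved), resolved
--
--     suffix_matches = [sid for sid in ids if sid.endswith(f"_{query}")]
--     if len(suffix_matches) == 1:
--         resolved = suffix_matches[0]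
--         return ids.index(resolved), resolved
--
--     if query.isdigit():
--         padded = query.zfill(4)
--         padded_matches = [sid for sid in ids if sid.endswith(f"_{padded}")]
--         if len(padded_matches) == 1:
--             resolved = padded_matches[0]
--             return ids.index(resolved), resolved
--
--         prefix_matches = [sid for sid in ids if sid.endswith(f"_{query}") or sid.endswith(f"_{padded}")]
--         if not prefix_matches:
--             prefix_matches = [sid for sid in ids if sid.rsplit("_", 1)[-1].startswith(query)]
--         if len(prefix_matches) > 1:
--             preview = ", ".join(prefix_matches[:5])
--             raise ValueError(
--                 f"query id is ambiguous: {query}. candidates (first 5): {preview}. "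
--                 "Please provide a full id like 'airplane/airplane_0001'."
--             )
--
--     raise ValueError(f"query id not found: {query}. Try a full id from --ids file.")
-- ===== SOURCE B (Python) =====
-- def resolve_query_id(ids: list[str], query: str) -> tuple[int, str]:
--     """Resolve query string to a unique specimen id in `ids` (single classifying pass over enumerate(ids))."""
--     isdig = query.isdigit()
--     padded = query.zfill(4) if isdig else ""
--     under_q = "_" + query
--     under_p = "_" + padded
--     exact, base, suff, pad = [], [], [], []
--     for i, sid in enumerate(ids):
--         if sid == query:
--             exact.append(i)
--         if sid.rsplit("/", 1)[-1] == query: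
--             base.append((i, sid))
--         if sid.endswith(under_q):
--             suff.append((i, sid))
--         if isdig and sid.endswith(under_p):
--             pad.append((i, sid))
--     if exact:
--         return exact[0], query
--     if len(base) == 1:
--         return base[0]
--     if len(suff) == 1:
--         return suff[0]
--     if isdig:
--         if len(pad) == 1:
--             return pad[0]
--         seen = {i for i, _ in suff}
--         candidates = sorted(suff + [p for p in pad if p[0] not in seen])
--         if not candidates:
--             candidates = [(i, sid) for i, sid in enumerate(ids)
--                           if sid.rsplit("_", 1)[-1].startswith(query)]
--         if len(candidates) > 1:
--             preview = ", ".join(sid for _, sid in candidates[:5])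
--             raise ValueError(
--                 f"query id is ambiguous: {query}. candidates (first 5): {preview}. "
--                 "Please provide a full id like 'airplane/airplane_0001'."
--             )
--     raise ValueError(f"query id not found: {query}. Try a full id from --ids file.")
-- ===== Notes on version B (the rewrite author's own statement) =====
-- stated objective: alternative
-- what changed: A's cascade of up to five separate filtering passes over ids (each followed by an ids.index re-scan) is replaced by one classifying pass over enumerate(ids) that fills index-carrying buckets (exact/basename/suffix/padded), after which the same cascade is decided purely on the prebuilt buckets.
import Mathlib
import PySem

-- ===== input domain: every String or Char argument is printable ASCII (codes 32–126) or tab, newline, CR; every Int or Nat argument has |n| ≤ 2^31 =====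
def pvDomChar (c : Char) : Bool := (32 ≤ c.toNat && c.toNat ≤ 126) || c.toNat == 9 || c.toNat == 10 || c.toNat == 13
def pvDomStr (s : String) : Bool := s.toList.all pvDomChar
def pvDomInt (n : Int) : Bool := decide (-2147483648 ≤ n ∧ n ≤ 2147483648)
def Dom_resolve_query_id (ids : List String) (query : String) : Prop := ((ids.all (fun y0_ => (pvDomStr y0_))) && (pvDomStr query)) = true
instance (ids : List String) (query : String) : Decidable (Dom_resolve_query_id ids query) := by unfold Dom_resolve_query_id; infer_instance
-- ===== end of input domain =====

-- B replaces A's cascade of up to five separate filtering passes (plus ids.index re-scans) by ONE classifying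
-- pass over enumerate(ids) that fills index-carrying buckets, then decides the same cascade on the buckets.

-- exact port of s.rsplit(sep, 1)[-1] for a one-character separator: the part after the LAST sep (whole string if absent)
def afterLastSep (sep : Char) (cs : List Char) : List Char :=
  (cs.reverse.takeWhile (fun c => c != sep)).reverse

-- the three match predicates both Pythons write as identical expressions
def pbBase (query : String) (sid : String) : Bool := afterLastSep '/' sid.toList == query.toList
def pbSuff (query : String) (sid : String) : Bool := PySem.Chars.endswith sid.toList ('_' :: query.toList)
def pbPad (query : String) (sid : String) : Bool := PySem.Chars.endswith sid.toList ('_' :: PySem.Chars.zfill query.toList 4)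

-- ===== PORT A =====
def resolve_query_id (ids : List String) (query : String) : Int × String :=
  if ids.contains query then
    ((((PySem.List.index? ids query).getD 0 : Nat) : Int), query)
  else
    let basename_matches := ids.filter (fun sid => pbBase query sid)
    if basename_matches.length == 1 then
      let resolved := basename_matches.headD ""
      ((((PySem.List.index? ids resolved).getD 0 : Nat) : Int), resolved)
    else
      let suffix_matches := ids.filter (fun sid => pbSuff query sid)
      if suffix_matches.length == 1 then
        let resolved := suffix_matches.headD ""
        ((((PySem.List.index? ids resolved).getD 0 : Nat) : Int), resolved)
      else if PySem.Str.strIsdigit query then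
        let padded_matches := ids.filter (fun sid => pbPad query sid)
        if padded_matches.length == 1 then
          let resolved := padded_matches.headD ""
          ((((PySem.List.index? ids resolved).getD 0 : Nat) : Int), resolved)
        else
          (-1, "")  -- Python raises ValueError (ambiguous or not found); outside Pre_
      else
        (-1, "")  -- Python raises ValueError (not found); outside Pre_

-- ===== PORT B =====
structure RQBuckets where
  ex : List Int
  base : List (Int × String)
  suff : List (Int × String)
  pad : List (Int × String)
deriving Repr, DecidableEq

-- one loop-body step of Source B's classifying pass
def rqStep (query : String) (isdig : Bool) (b : RQBuckets) (p : Int × String) : RQBuckets :=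
  let b := if p.2 == query then { b with ex := b.ex ++ [p.1] } else b
  let b := if pbBase query p.2 then { b with base := b.base ++ [p] } else b
  let b := if pbSuff query p.2 then { b with suff := b.suff ++ [p] } else b
  if isdig && pbPad query p.2 then { b with pad := b.pad ++ [p] } else b

def resolve_query_id_alt (ids : List String) (query : String) : Int × String :=
  let isdig := PySem.Str.strIsdigit query
  let b := (PySem.List.enumerate ids 0).foldl (rqStep query isdig) ⟨[], [], [], []⟩
  if !b.ex.isEmpty then (b.ex.headD 0, query)
  else if b.base.length == 1 then b.base.headD (0, "")
  else if b.suff.length == 1 then b.suff.headD (0, "")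
  else if isdig && b.pad.length == 1 then b.pad.headD (0, "")
  else (-1, "")  -- Source B raises ValueError here (ambiguous / not found); outside Pre_

-- ===== PRECONDITION & SPEC =====
-- Pre_ = exactly the inputs on which Python A returns (one branch of its cascade resolves); on all others A raises ValueError.
def Pre_resolve_query_id (ids : List String) (query : String) : Prop :=
  query ∈ ids
  ∨ (ids.filter (fun sid => pbBase query sid)).length = 1
  ∨ (ids.filter (fun sid => pbSuff query sid)).length = 1
  ∨ (PySem.Str.strIsdigit query = true ∧ (ids.filter (fun sid => pbPad query sid)).length = 1)
instance (ids : List String) (query : String) : Decidable (Pre_resolve_query_id ids query) := by unfold Pre_resolve_query_id; infer_instance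

def pvWitness_resolve_query_id : List String × String := (["airplane/airplane_0001", "chair/chair_0042"], "airplane_0001")

def Spec_resolve_query_id (ids : List String) (query : String) (out : Int × String) : Prop := out = resolve_query_id_alt ids query
instance (ids : List String) (query : String) (out : Int × String) : Decidable (Spec_resolve_query_id ids query out) := by unfold Spec_resolve_query_id; infer_instance

-- ===== CLAIM (what is proved, stated in full; the proofs are below) =====
def Claim_equal_resolve_query_id : Prop := ∀ (ids : List String) (query : String), Dom_resolve_query_id ids query → Pre_resolve_query_id ids query → Spec_resolve_query_id ids query (resolve_query_id ids query)

-- ===== LEMMAS AND PROOFS =====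

-- the classifying fold fills each bucket with exactly the corresponding filter of the enumerated list
theorem rq_foldl (query : String) (isdig : Bool) :
    ∀ (l : List (Int × String)) (b0 : RQBuckets),
      l.foldl (rqStep query isdig) b0 =
        ⟨b0.ex ++ (l.filter (fun p => p.2 == query)).map (·.1),
         b0.base ++ l.filter (fun p => pbBase query p.2),
         b0.suff ++ l.filter (fun p => pbSuff query p.2),
         b0.pad ++ l.filter (fun p => isdig && pbPad query p.2)⟩ := by
  intro l
  induction l with
  | nil => intro b0; simp
  | cons x xs ih =>
      intro b0
      rw [List.foldl_cons, ih]
      simp only [rqStep, List.filter_cons]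
      split_ifs <;> simp_all

-- the second components of a filtered enumeration are the filtered list itself
theorem filter_enum_map_snd (pr : String → Bool) :
    ∀ (xs : List String) (s : Int),
      ((PySem.List.enumerate xs s).filter (fun p => pr p.2)).map (·.2) = xs.filter pr := by
  intro xs
  induction xs with
  | nil => intro s; simp
  | cons x xs ih =>
      intro s
      rw [PySem.List.enumerate_cons]
      by_cases h : pr x <;> simp [h, ih]

-- a singleton filtered enumeration pins down list.index of its element
theorem filter_enum_singleton (pr : String → Bool) :
    ∀ (xs : List String) (s i : Int) (sid : String),
      (PySem.List.enumerate xs s).filter (fun p => pr p.2) = [(i, sid)] →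
      pr sid = true ∧ ∃ k : Nat, PySem.List.index? xs sid = some k ∧ (k : Int) + s = i := by
  intro xs
  induction xs with
  | nil => intro s i sid h; simp at h
  | cons x xs ih =>
      intro s i sid h
      rw [PySem.List.enumerate_cons] at h
      by_cases hx : pr x
      · rw [List.filter_cons_of_pos (by simpa using hx)] at h
        obtain ⟨h1, h2⟩ := List.cons_eq_cons.mp h
        have hs : s = i := congrArg Prod.fst h1
        have hx2 : x = sid := congrArg Prod.snd h1
        subst hx2
        refine ⟨hx, 0, PySem.List.index?_cons_self x xs, ?_⟩
        simpa using hs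
      · rw [List.filter_cons_of_neg (by simpa using hx)] at h
        obtain ⟨hpr, k, hk, hi⟩ := ih (s + 1) i sid h
        have hne : x ≠ sid := fun he => hx (he ▸ hpr)
        refine ⟨hpr, k + 1, ?_, by push_cast; omega⟩
        rw [PySem.List.index?_cons_of_ne xs hne, hk]; rfl

-- head of the exact-match bucket is list.index of the query
theorem exact_head (query : String) :
    ∀ (xs : List String) (s : Int) (k : Nat),
      PySem.List.index? xs query = some k →
      (((PySem.List.enumerate xs s).filter (fun p => p.2 == query)).map (·.1)).headD 0 = (k : Int) + s := by
  intro xs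
  induction xs with
  | nil => intro s k h; simp [PySem.List.index?_eq_idxOf?] at h
  | cons x xs ih =>
      intro s k h
      rw [PySem.List.enumerate_cons]
      by_cases hx : x = query
      · subst hx
        rw [PySem.List.index?_cons_self] at h
        obtain rfl : 0 = k := by simpa using h
        simp
      · rw [PySem.List.index?_cons_of_ne xs hx] at h
        obtain ⟨k', hk', rfl⟩ := Option.map_eq_some_iff.mp h
        rw [List.filter_cons_of_neg (by simpa using hx)]
        rw [ih (s + 1) k' hk']
        push_cast; ring

theorem filter_enum_eq_nil (query : String) :
    ∀ (xs : List String) (s : Int),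
      query ∉ xs → (PySem.List.enumerate xs s).filter (fun p => p.2 == query) = [] := by
  intro xs
  induction xs with
  | nil => intro s _; simp
  | cons x xs ih =>
      intro s h
      rw [PySem.List.enumerate_cons]
      have hx : x ≠ query := fun he => h (he ▸ List.mem_cons_self ..)
      rw [List.filter_cons_of_neg (by simpa using hx)]
      exact ih (s + 1) (fun hm => h (List.mem_cons_of_mem _ hm))

-- helper: the unique-match branch returns the same pair on both sides
theorem branch_eq (pr : String → Bool) (ids : List String)
    (h : (ids.filter pr).length = 1) :
    ((((PySem.List.index? ids ((ids.filter pr).headD "")).getD 0 : Nat) : Int), (ids.filter pr).headD "")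
      = ((PySem.List.enumerate ids 0).filter (fun p => pr p.2)).headD (0, "") := by
  have hm := filter_enum_map_snd pr ids 0
  have hlen : ((PySem.List.enumerate ids 0).filter (fun p => pr p.2)).length = 1 := by
    rw [← hm] at h; simpa using h
  obtain ⟨⟨i, sid⟩, hE⟩ := List.length_eq_one_iff.mp hlen
  obtain ⟨hpr, k, hk, hi⟩ := filter_enum_singleton pr ids 0 i sid hE
  have hf : ids.filter pr = [sid] := by rw [← hm, hE]; rfl
  rw [hE, hf]
  simp only [List.headD_cons]
  rw [hk]
  simp only [Option.getD_some]
  exact Prod.ext (by show (k : Int) = i; omega) rfl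

-- ===== VERDICT (by name: the statement is the Claim_ definition above) =====
theorem resolve_query_id_spec : Claim_equal_resolve_query_id := by
  intro ids query _ hpre
  unfold Spec_resolve_query_id
  simp only [resolve_query_id, resolve_query_id_alt, rq_foldl, List.nil_append]
  by_cases hq : query ∈ ids
  · have hc : ids.contains query = true := by simpa using hq
    obtain ⟨k, hk⟩ : ∃ k, PySem.List.index? ids query = some k :=
      Option.isSome_iff_exists.mp ((PySem.List.index?_isSome_iff ids query).mpr hq)
    have hhead := exact_head query ids 0 k hk
    have hfne : ids.filter (fun sid => sid == query) ≠ [] :=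
      List.ne_nil_of_mem (List.mem_filter.mpr ⟨hq, by simp⟩)
    have hm := filter_enum_map_snd (fun sid => sid == query) ids 0
    have hEne : ((PySem.List.enumerate ids 0).filter (fun p => p.2 == query)).map (fun x => x.1) ≠ [] := by
      intro hnil
      apply hfne
      rw [← hm]
      simp only [List.map_eq_nil_iff] at hnil ⊢
      exact hnil
    have cB1 : (!(((PySem.List.enumerate ids 0).filter (fun p => p.2 == query)).map (fun x => x.1)).isEmpty) = true := by
      simpa using hEne
    rw [if_pos hc, if_pos cB1]
    rw [hk]
    simp only [Option.getD_some]
    refine Prod.ext ?_ rfl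
    simpa using hhead.symm
  · have hE0 : (PySem.List.enumerate ids 0).filter (fun p => p.2 == query) = [] :=
      filter_enum_eq_nil query ids 0 hq
    have cA1 : ¬ (ids.contains query = true) := by simpa using hq
    have cB1 : ¬ ((!(((PySem.List.enumerate ids 0).filter (fun p => p.2 == query)).map (fun x => x.1)).isEmpty) = true) := by
      rw [hE0]; simp
    rw [if_neg cA1, if_neg cB1]
    have hmB := filter_enum_map_snd (fun sid => pbBase query sid) ids 0
    have hlB : ((PySem.List.enumerate ids 0).filter (fun p => pbBase query p.2)).length
        = (ids.filter (fun sid => pbBase query sid)).length := by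
      rw [← hmB]; simp
    by_cases h1 : (ids.filter (fun sid => pbBase query sid)).length = 1
    · have cA2 : ((ids.filter (fun sid => pbBase query sid)).length == 1) = true := by simpa using h1
      have cB2 : (((PySem.List.enumerate ids 0).filter (fun p => pbBase query p.2)).length == 1) = true := by
        rw [hlB]; simpa using h1
      rw [if_pos cA2, if_pos cB2]
      exact branch_eq _ ids h1
    · have cA2 : ¬ (((ids.filter (fun sid => pbBase query sid)).length == 1) = true) := by simpa using h1
      have cB2 : ¬ ((((PySem.List.enumerate ids 0).filter (fun p => pbBase query p.2)).length == 1) = true) := by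
        rw [hlB]; simpa using h1
      rw [if_neg cA2, if_neg cB2]
      have hmS := filter_enum_map_snd (fun sid => pbSuff query sid) ids 0
      have hlS : ((PySem.List.enumerate ids 0).filter (fun p => pbSuff query p.2)).length
          = (ids.filter (fun sid => pbSuff query sid)).length := by
        rw [← hmS]; simp
      by_cases h2 : (ids.filter (fun sid => pbSuff query sid)).length = 1
      · have cA3 : ((ids.filter (fun sid => pbSuff query sid)).length == 1) = true := by simpa using h2
        have cB3 : (((PySem.List.enumerate ids 0).filter (fun p => pbSuff query p.2)).length == 1) = true := by
          rw [hlS]; simpa using h2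
        rw [if_pos cA3, if_pos cB3]
        exact branch_eq _ ids h2
      · have cA3 : ¬ (((ids.filter (fun sid => pbSuff query sid)).length == 1) = true) := by simpa using h2
        have cB3 : ¬ ((((PySem.List.enumerate ids 0).filter (fun p => pbSuff query p.2)).length == 1) = true) := by
          rw [hlS]; simpa using h2
        rw [if_neg cA3, if_neg cB3]
        by_cases hd : PySem.Str.strIsdigit query = true
        · rw [if_pos hd]
          have hmP := filter_enum_map_snd (fun sid => pbPad query sid) ids 0
          have hfP : (PySem.List.enumerate ids 0).filter (fun p => PySem.Str.strIsdigit query && pbPad query p.2)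
              = (PySem.List.enumerate ids 0).filter (fun p => pbPad query p.2) := by
            simp only [hd, Bool.true_and]
          have hlP : ((PySem.List.enumerate ids 0).filter (fun p => pbPad query p.2)).length
              = (ids.filter (fun sid => pbPad query sid)).length := by
            rw [← hmP]; simp
          by_cases h3 : (ids.filter (fun sid => pbPad query sid)).length = 1
          · have cA4 : ((ids.filter (fun sid => pbPad query sid)).length == 1) = true := by simpa using h3
            have cB4 : ((PySem.Str.strIsdigit query && (((PySem.List.enumerate ids 0).filter (fun p => PySem.Str.strIsdigit query && pbPad query p.2)).length == 1)) = true) := by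
              simp only [hd, Bool.true_and, hlP]; simpa using h3
            rw [if_pos cA4, if_pos cB4]
            simp only [hd, Bool.true_and]
            exact branch_eq _ ids h3
          · exfalso
            rcases hpre with h | h | h | ⟨_, h⟩
            · exact hq h
            · exact h1 h
            · exact h2 h
            · exact h3 h
        · exfalso
          rcases hpre with h | h | h | ⟨hd', _⟩
          · exact hq h
          · exact h1 h
          · exact h2 h
          · exact hd hd'
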